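-- pv_equiv track=rewrite | github.com/cgobat/faces-project | metapie/gui/controller.py | _labelize
-- ===== SOURCE A (Python) =====
-- def _labelize(title):
--     label = ""
--     do_remove = False
--     for c in title:
--         if do_remove:
--             do_remove = False
--         elif c == '&':
--             do_remove = True
--             continue
--
--         if c == "\t":
--             break
--
--         label += c
--
--     return label
-- ===== SOURCE B (Python) =====
-- def _labelize(title):
--     # Two-pass: truncate at the first tab, then strip '&' accelerator markers pairwise.
--     head = title.split('\t', 1)[0]
--     out = []
--     i = 0
--     n = len(head)
--     while i < n:
--         if head[i] == '&':
--             if i + 1 < n: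
--                 out.append(head[i + 1])
--             i += 2
--         else:
--             out.append(head[i])
--             i += 1
--     return ''.join(out)
-- ===== Notes on version B (the rewrite author's own statement) =====
-- stated objective: simpler
-- what changed: Replaces A's single character-by-character loop carrying a do_remove flag and a mid-loop break with a two-pass decomposition: first truncate at the first tab with str.split, then strip ampersand accelerator markers in a pairwise index scan.
import Mathlib
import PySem

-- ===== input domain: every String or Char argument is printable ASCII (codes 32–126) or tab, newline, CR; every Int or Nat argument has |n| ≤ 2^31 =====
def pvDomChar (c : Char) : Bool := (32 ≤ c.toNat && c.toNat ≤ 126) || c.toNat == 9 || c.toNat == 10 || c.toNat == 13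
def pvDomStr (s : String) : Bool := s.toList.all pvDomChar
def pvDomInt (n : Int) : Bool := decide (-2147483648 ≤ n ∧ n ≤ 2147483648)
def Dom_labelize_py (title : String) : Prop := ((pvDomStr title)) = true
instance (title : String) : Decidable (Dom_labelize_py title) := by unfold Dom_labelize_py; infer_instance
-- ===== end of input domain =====

-- B replaces A's single interleaved flag-carrying loop by a two-pass decomposition
-- (truncate at the first tab, then strip '&' markers pairwise); objective: simpler.

-- ===== PORT A =====
-- A's for-loop with the do_remove flag and early break, as structural recursion on the chars.
def labelizeA : List Char → Bool → List Char
  | [], _ => []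
  | c :: rest, doRemove =>
    if doRemove then
      -- do_remove := False, then the tab check and append
      if c = '\t' then [] else c :: labelizeA rest false
    else if c = '&' then
      -- do_remove := True; continue
      labelizeA rest true
    else if c = '\t' then [] else c :: labelizeA rest false

def labelize_py (title : String) : String :=
  String.ofList (labelizeA title.toList false)

-- ===== PORT B =====
-- pairwise '&'-stripping (the while loop of Source B)
def stripAmp : List Char → List Char
  | [] => []
  | c :: rest =>
    if c = '&' then
      match rest with
      | [] => []
      | d :: ds => d :: stripAmp ds
    else c :: stripAmp rest

def labelize_py_alt (title : String) : String :=
  String.ofList (stripAmp (title.toList.takeWhile (· ≠ '\t')))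

-- ===== PRECONDITION & SPEC =====
def Spec_labelize_py (title : String) (out : String) : Prop := out = labelize_py_alt title
instance (title : String) (out : String) : Decidable (Spec_labelize_py title out) := by unfold Spec_labelize_py; infer_instance

-- ===== CLAIM (what is proved, stated in full; the proofs are below) =====
def Claim_equal_labelize_py : Prop := ∀ (title : String), Dom_labelize_py title → Spec_labelize_py title (labelize_py title)

-- ===== LEMMAS AND PROOFS =====
theorem stripAmp_cons (c : Char) (x : List Char) :
    stripAmp (c :: x) =
      if c = '&' then (match x with | [] => [] | d :: ds => d :: stripAmp ds)
      else c :: stripAmp x := by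
  rw [stripAmp.eq_def]

theorem labelizeA_eq (l : List Char) :
    labelizeA l false = stripAmp (l.takeWhile (· ≠ '\t')) ∧
    labelizeA l true =
      (match l.takeWhile (· ≠ '\t') with
       | [] => []
       | d :: ds => d :: stripAmp ds) := by
  induction l with
  | nil => simp [labelizeA, stripAmp, List.takeWhile]
  | cons c rest ih =>
    by_cases ht : c = '\t'
    · subst ht
      constructor
      · rw [List.takeWhile_cons, if_neg (by decide)]
        simp [labelizeA, stripAmp]
      · rw [List.takeWhile_cons, if_neg (by decide)]
        simp [labelizeA]
    · have hp : (fun x => decide (x ≠ '\t')) c = true := by simp [ht]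
      by_cases ha : c = '&'
      · subst ha
        constructor
        · rw [List.takeWhile_cons, if_pos hp, stripAmp_cons, if_pos rfl]
          rw [show labelizeA ('&' :: rest) false = labelizeA rest true by simp [labelizeA]]
          exact ih.2
        · rw [List.takeWhile_cons, if_pos hp]
          rw [show labelizeA ('&' :: rest) true = '&' :: labelizeA rest false by
            simp [labelizeA]]
          exact congrArg ('&' :: ·) ih.1
      · constructor
        · rw [List.takeWhile_cons, if_pos hp, stripAmp_cons, if_neg ha]
          rw [show labelizeA (c :: rest) false = c :: labelizeA rest false by
            simp [labelizeA, ha, ht]]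
          exact congrArg (c :: ·) ih.1
        · rw [List.takeWhile_cons, if_pos hp]
          rw [show labelizeA (c :: rest) true = c :: labelizeA rest false by
            simp [labelizeA, ht]]
          exact congrArg (c :: ·) ih.1

-- ===== VERDICT (by name: the statement is the Claim_ definition above) =====
theorem labelize_py_spec : Claim_equal_labelize_py := by
  intro title _
  unfold Spec_labelize_py labelize_py labelize_py_alt
  exact congrArg String.ofList (labelizeA_eq title.toList).1
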